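-- pv_equiv track=rewrite | github.com/Chung-I/tsm | tsm/tsm_g2p.py | phrase_boundary_to_start_and_ends
-- ===== SOURCE A (Python) =====
-- from typing import List, Dict, Tuple
--
-- def phrase_boundary_to_start_and_ends(boundaries: List[bool]) -> List[Tuple[int, int]]:
--     """
--         [False, False, True, False, True] -> [(0, 3), (3, 5)]
--     """
--     start = 0
--     start_and_ends = []
--     for idx in range(len(boundaries)):
--         if boundaries[idx]:
--             start_and_ends.append((start, idx+1))
--             start = idx+1
--     return start_and_ends
-- ===== SOURCE B (Python) =====
-- from typing import List, Tuple
--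
-- def phrase_boundary_to_start_and_ends(boundaries: List[bool]) -> List[Tuple[int, int]]:
--     ends = [i + 1 for i, b in enumerate(boundaries) if b]
--     starts = [0] + ends[:-1]
--     return list(zip(starts, ends))
-- ===== Notes on version B (the rewrite author's own statement) =====
-- stated objective: alternative
-- what changed: Replaces the stateful single-pass append-and-reset loop by collecting all cut-points (ends) first and pairing each with the previous cut-point via a shifted copy and zip.
import Mathlib
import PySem

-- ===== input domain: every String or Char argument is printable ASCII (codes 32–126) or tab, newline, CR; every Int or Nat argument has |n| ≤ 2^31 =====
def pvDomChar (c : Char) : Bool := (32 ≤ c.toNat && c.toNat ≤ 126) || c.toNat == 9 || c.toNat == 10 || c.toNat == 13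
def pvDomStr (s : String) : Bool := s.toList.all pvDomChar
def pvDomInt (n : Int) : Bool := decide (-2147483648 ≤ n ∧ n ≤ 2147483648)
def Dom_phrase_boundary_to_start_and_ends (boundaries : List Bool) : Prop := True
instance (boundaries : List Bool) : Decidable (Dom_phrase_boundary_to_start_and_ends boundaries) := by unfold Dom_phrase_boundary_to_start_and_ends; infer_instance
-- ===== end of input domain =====

-- B replaces A's stateful append-and-reset loop by collecting all cut-points first and
-- zipping them with a shifted copy (alternative decomposition, same O(n) cost).

-- ===== PORT A =====
-- start = 0; start_and_ends = []; for idx in range(len(boundaries)): …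
-- boundaries[idx] is read with pyGetD _ _ false: exact, since idx is always in range here.
def phrase_boundary_to_start_and_ends (boundaries : List Bool) : List (Int × Int) :=
  ((PySem.List.pyRange 0 (boundaries.length : Int) 1).foldl
    (fun (st : Int × List (Int × Int)) idx =>
      if PySem.List.pyGetD boundaries idx false then (idx + 1, st.2 ++ [(st.1, idx + 1)]) else st)
    (0, [])).2

-- ===== PORT B =====
-- ends = [i+1 for i,b in enumerate(boundaries) if b]; starts = [0] + ends[:-1]; zip
def phrase_boundary_to_start_and_ends_alt (boundaries : List Bool) : List (Int × Int) :=
  let ends : List Int :=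
    (PySem.List.enumerate boundaries 0).filterMap (fun p => if p.2 then some (p.1 + 1) else none)
  let starts : List Int := 0 :: PySem.List.slice ends none (some (-1))
  starts.zip ends

-- ===== PRECONDITION & SPEC =====
def Spec_phrase_boundary_to_start_and_ends (boundaries : List Bool) (out : List (Int × Int)) : Prop := out = phrase_boundary_to_start_and_ends_alt boundaries
instance (boundaries : List Bool) (out : List (Int × Int)) : Decidable (Spec_phrase_boundary_to_start_and_ends boundaries out) := by unfold Spec_phrase_boundary_to_start_and_ends; infer_instance

-- ===== CLAIM (what is proved, stated in full; the proofs are below) =====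
def Claim_equal_phrase_boundary_to_start_and_ends : Prop := ∀ (boundaries : List Bool), Dom_phrase_boundary_to_start_and_ends boundaries → Spec_phrase_boundary_to_start_and_ends boundaries (phrase_boundary_to_start_and_ends boundaries)

-- ===== LEMMAS AND PROOFS =====

-- the list of cut-points of bs when indexing starts at i (B's `ends`, generalized offset)
def pvEnds (bs : List Bool) (i : Int) : List Int :=
  (PySem.List.enumerate bs i).filterMap (fun p => if p.2 then some (p.1 + 1) else none)

theorem pvEnds_cons (b : Bool) (bs : List Bool) (i : Int) :
    pvEnds (b :: bs) i = (if b then [i + 1] else []) ++ pvEnds bs (i + 1) := by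
  cases b <;> simp [pvEnds, PySem.List.enumerate_cons]

theorem zip_cons_dropLast (a : Int) (l : List Int) :
    (a :: l.dropLast).zip l = ((a :: l).dropLast).zip l := by
  cases l <;> simp

theorem loopA (bs : List Bool) (i s : Int) (acc : List (Int × Int)) :
    ((PySem.List.enumerate bs i).foldl
      (fun (st : Int × List (Int × Int)) p =>
        if p.2 then (p.1 + 1, st.2 ++ [(st.1, p.1 + 1)]) else st) (s, acc)).2
    = acc ++ (s :: (pvEnds bs i).dropLast).zip (pvEnds bs i) := by
  induction bs generalizing i s acc with
  | nil => simp [pvEnds, PySem.List.enumerate_nil]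
  | cons b bs ih =>
    rw [PySem.List.enumerate_cons]
    cases b with
    | false => simpa [pvEnds_cons] using ih (i + 1) s acc
    | true =>
      simp only [List.foldl_cons, pvEnds_cons, if_true]
      rw [ih (i + 1) (i + 1) (acc ++ [(s, i + 1)])]
      rw [zip_cons_dropLast (i + 1) (pvEnds bs (i + 1))]
      simp [List.zip]

-- ===== VERDICT (by name: the statement is the Claim_ definition above) =====
theorem portA_enum (bs : List Bool) :
    phrase_boundary_to_start_and_ends bs
    = ((PySem.List.enumerate bs 0).foldl
        (fun (st : Int × List (Int × Int)) p =>
          if p.2 then (p.1 + 1, st.2 ++ [(st.1, p.1 + 1)]) else st) (0, [])).2 := by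
  unfold phrase_boundary_to_start_and_ends
  rw [PySem.List.enumerate_eq_map_pyRange (d := false), List.foldl_map]
  simp [PySem.List.len]

theorem phrase_boundary_to_start_and_ends_spec : Claim_equal_phrase_boundary_to_start_and_ends := by
  intro bs _
  show phrase_boundary_to_start_and_ends bs = phrase_boundary_to_start_and_ends_alt bs
  rw [portA_enum, loopA]
  simp only [List.nil_append]
  simp [phrase_boundary_to_start_and_ends_alt, PySem.List.slice_to_neg_one, pvEnds]
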